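-- pv_equiv track=rewrite | github.com/minhnbnt/ptit_solutions | dsa/DSA03017.py | minimumValue
-- ===== SOURCE A (Python) =====
-- import heapq
-- from collections import Counter
--
-- def minimumValue(string: str, removeAttempt: int) -> int:
--     charsCounter = Counter(string)
--
--     # default is min-heap, so we use negative
--     queue = [-value for value in charsCounter.values()]
--     heapq.heapify(queue)
--
--     for _ in range(removeAttempt):
--         value = heapq.heappop(queue)
--         heapq.heappush(queue, value + 1)
--
--     return sum(value**2 for value in queue)
-- ===== SOURCE B (Python) =====
-- from collections import Counter
--
--
-- def minimumValue(string: str, removeAttempt: int) -> int: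
--     counts = list(Counter(string).values())
--     if not counts:
--         return 0
--
--     k = max(removeAttempt, 0)
--
--     def excess(level):
--         return sum(c - level for c in counts if c > level)
--
--     # binary search the water level: smallest L with excess(L) <= k
--     lo, hi = min(counts) - k - 1, max(counts)  # excess(lo) > k, excess(hi) == 0 <= k
--     while lo + 1 < hi:
--         mid = (lo + hi) // 2
--         if excess(mid) <= k:
--             hi = mid
--         else:
--             lo = mid
--     level = hi
--
--     r = k - excess(level)                  # leftover removals, spread one each
--     atOrAbove = sum(1 for c in counts if c >= level)
--     return (sum(c * c for c in counts if c < level)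
--             + (atOrAbove - r) * level * level
--             + r * (level - 1) * (level - 1))
-- ===== Notes on version B (the rewrite author's own statement) =====
-- stated objective: alternative
-- what changed: Instead of simulating removeAttempt heap-pop/decrement/push steps, B binary-searches the final 'water level' of the character counts, distributes the leftover decrements, and returns a closed-form sum of squares (intended as asymptotically faster in removeAttempt; a timing run measured ~1.9x at its largest size but not consistently over 1.5x, so no speed is claimed).
import Mathlib
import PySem

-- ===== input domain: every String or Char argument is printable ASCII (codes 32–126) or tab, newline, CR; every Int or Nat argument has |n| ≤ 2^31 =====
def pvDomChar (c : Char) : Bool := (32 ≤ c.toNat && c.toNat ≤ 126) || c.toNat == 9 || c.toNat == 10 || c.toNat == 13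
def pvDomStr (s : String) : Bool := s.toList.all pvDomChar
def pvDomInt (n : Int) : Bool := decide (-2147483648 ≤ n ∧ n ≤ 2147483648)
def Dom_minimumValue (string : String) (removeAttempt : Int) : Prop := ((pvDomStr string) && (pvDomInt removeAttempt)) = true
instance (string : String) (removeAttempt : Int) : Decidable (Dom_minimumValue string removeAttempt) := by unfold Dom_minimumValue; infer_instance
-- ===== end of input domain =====

-- B replaces A's removeAttempt-iteration heap simulation by a binary search for the final
-- "water level" of the counts plus a closed-form sum of squares.

-- ===== PORT A =====
-- heapq is modelled as a min-multiset: heappop removes a minimal element (its VALUE is what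
-- Python's heappop returns), heappush appends, heapify is the identity; this is exact for the
-- returned sum, which does not depend on the heap's internal layout.
def aStep (queue : List Int) : List Int :=
  match PySem.List.min? queue (fun x => x) with
  | none => queue            -- Python raises IndexError here; excluded by Pre_
  | some value => (queue.erase value) ++ [value + 1]

def aLoop : Nat → List Int → List Int
  | 0, q => q
  | n + 1, q => aLoop n (aStep q)

def minimumValue (string : String) (removeAttempt : Int) : Int :=
  let charsCounter := PySem.Dict.counter string.toList
  let queue := charsCounter.values.map (fun value => -value)
  let queue := aLoop removeAttempt.toNat queue    -- for _ in range(removeAttempt)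
  (queue.map (fun value => value ^ 2)).sum

-- ===== PORT B =====
def altExcess (counts : List Int) (level : Int) : Int :=
  ((counts.filter (fun c => decide (level < c))).map (fun c => c - level)).sum

-- cited by altSearch's decreasing_by
theorem pvMidBounds (lo hi : Int) (h : lo + 1 < hi) :
    lo < PySem.Int.floordiv (lo + hi) 2 ∧ PySem.Int.floordiv (lo + hi) 2 < hi := by
  constructor
  · have := (PySem.Int.le_floordiv_iff_mul_le (a := lo + hi) (b := 2) (q := lo + 1) (by omega)).mpr
      (by omega)
    omega
  · exact (PySem.Int.floordiv_lt_iff_lt_mul (a := lo + hi) (b := 2) (q := hi) (by omega)).mpr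
      (by omega)

def altSearch (counts : List Int) (k lo hi : Int) : Int :=
  if h : lo + 1 < hi then
    let mid := PySem.Int.floordiv (lo + hi) 2
    if altExcess counts mid ≤ k then altSearch counts k lo mid
    else altSearch counts k mid hi
  else hi
termination_by (hi - lo).toNat
decreasing_by
  · have := pvMidBounds lo hi h; omega
  · have := pvMidBounds lo hi h; omega

def minimumValue_alt (string : String) (removeAttempt : Int) : Int :=
  match (PySem.Dict.counter string.toList).values with
  | [] => 0
  | c :: rest =>
    let counts := c :: rest
    let k := max removeAttempt 0
    let lo := rest.foldl min c - k - 1      -- min(counts) - k - 1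
    let hi := rest.foldl max c              -- max(counts)
    let level := altSearch counts k lo hi
    let r := k - altExcess counts level
    let atOrAbove : Int := ((counts.filter (fun x => decide (level ≤ x))).length : Int)
    ((counts.filter (fun x => decide (x < level))).map (fun x => x * x)).sum
      + (atOrAbove - r) * level * level + r * (level - 1) * (level - 1)

-- ===== PRECONDITION & SPEC =====
-- Pre_ excludes exactly the inputs where A raises IndexError: heappop on the empty heap
-- (empty string with removeAttempt ≥ 1); A is total elsewhere.
def Pre_minimumValue (string : String) (removeAttempt : Int) : Prop :=
  string = "" → removeAttempt ≤ 0
instance (string : String) (removeAttempt : Int) : Decidable (Pre_minimumValue string removeAttempt) := by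
  unfold Pre_minimumValue; infer_instance

def pvWitness_minimumValue : String × Int := ("abca", 2)

def Spec_minimumValue (string : String) (removeAttempt : Int) (out : Int) : Prop := out = minimumValue_alt string removeAttempt
instance (string : String) (removeAttempt : Int) (out : Int) : Decidable (Spec_minimumValue string removeAttempt out) := by unfold Spec_minimumValue; infer_instance

-- ===== CLAIM (what is proved, stated in full; the proofs are below) =====
def Claim_equal_minimumValue : Prop := ∀ (string : String) (removeAttempt : Int), Dom_minimumValue string removeAttempt → Pre_minimumValue string removeAttempt → Spec_minimumValue string removeAttempt (minimumValue string removeAttempt)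

-- ===== LEMMAS AND PROOFS =====

-- `pvG s L` = total amount by which elements of s lie below level L ("water missing up to L").
def pvG (s : Multiset Int) (L : Int) : Int := (s.map (fun x => max (L - x) 0)).sum
-- number of elements ≤ L
def pvNle (s : Multiset Int) (L : Int) : Nat := (s.filter (fun x => x ≤ L)).card
-- canonical state after k raise-the-minimum steps, at level L with r leftovers
def pvCanon (s : Multiset Int) (L : Int) (r : Nat) : Multiset Int :=
  s.filter (fun x => L < x) + Multiset.replicate (pvNle s L - r) L + Multiset.replicate r (L + 1)

theorem pvG_nonneg (s : Multiset Int) (L : Int) : 0 ≤ pvG s L := by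
  apply Multiset.sum_nonneg
  intro x hx
  obtain ⟨y, _, rfl⟩ := Multiset.mem_map.mp hx
  exact le_max_right _ _

theorem pvG_mono (s : Multiset Int) {L L' : Int} (h : L ≤ L') : pvG s L ≤ pvG s L' := by
  apply Multiset.sum_map_le_sum_map
  intro i _
  exact max_le_max (by omega) le_rfl

theorem pvG_succ (s : Multiset Int) (L : Int) : pvG s (L + 1) = pvG s L + (pvNle s L : Int) := by
  induction s using Multiset.induction_on with
  | empty => simp [pvG, pvNle]
  | cons a t ih =>
    have hmax : max (L + 1 - a) 0 = max (L - a) 0 + (if a ≤ L then (1 : Int) else 0) := by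
      rcases le_or_gt a L with h | h <;> simp [h] <;> omega
    have hfil : pvNle (a ::ₘ t) L = (if a ≤ L then 1 else 0) + pvNle t L := by
      unfold pvNle
      rw [Multiset.filter_cons]
      rcases le_or_gt a L with h | h
      · simp [h]
        omega
      · simp [show ¬ a ≤ L by omega]
    have hg1 : pvG (a ::ₘ t) (L + 1) = max (L + 1 - a) 0 + pvG t (L + 1) := by
      unfold pvG; simp
    have hg2 : pvG (a ::ₘ t) L = max (L - a) 0 + pvG t L := by
      unfold pvG; simp
    rw [hg1, hg2, ih, hfil, hmax]
    split_ifs <;> push_cast <;> ring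

theorem pv_single_le_G {s : Multiset Int} {x : Int} (hx : x ∈ s) (L : Int) :
    max (L - x) 0 ≤ pvG s L := by
  apply Multiset.single_le_sum
  · intro y hy
    obtain ⟨z, _, rfl⟩ := Multiset.mem_map.mp hy
    exact le_max_right _ _
  · exact Multiset.mem_map_of_mem _ hx

theorem pvLev_unique {s : Multiset Int} {k L L' : Int}
    (h0 : pvG s L ≤ k) (h1 : k < pvG s (L + 1))
    (h0' : pvG s L' ≤ k) (h1' : k < pvG s (L' + 1)) : L = L' := by
  rcases lt_trichotomy L L' with h | h | h
  · have := pvG_mono s (show L + 1 ≤ L' by omega)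
    omega
  · exact h
  · have := pvG_mono s (show L' + 1 ≤ L by omega)
    omega

theorem pv_exists_lev (l : List Int) (hl : l ≠ []) (k : Nat) :
    ∃ L : Int, pvG (↑l) L ≤ (k : Int) ∧ (k : Int) < pvG (↑l) (L + 1) := by
  obtain ⟨c, t, rfl⟩ : ∃ c t, l = c :: t := by
    cases l with
    | nil => exact absurd rfl hl
    | cons c t => exact ⟨c, t, rfl⟩
  set mn := t.foldl min c with hmn
  have hmem : mn ∈ (c :: t) := by
    rcases PySem.List.foldl_min_mem t c with h | h
    · rw [hmn, h]; exact List.mem_cons_self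
    · exact List.mem_cons_of_mem _ h
  have hlow : ∀ x ∈ (c :: t), mn ≤ x := by
    intro x hx
    rcases List.mem_cons.mp hx with rfl | hx
    · exact (PySem.List.foldl_min_le t x).1
    · exact (PySem.List.foldl_min_le t c).2 x hx
  have hP0 : pvG (↑(c :: t)) (mn + (0 : Nat)) ≤ (k : Int) := by
    have : pvG (↑(c :: t)) mn = 0 := by
      apply Multiset.sum_eq_zero
      intro z hz
      obtain ⟨y, hy, rfl⟩ := Multiset.mem_map.mp hz
      have := hlow y (by exact_mod_cast hy)
      omega
    simp only [Nat.cast_zero, add_zero]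
    omega
  set d0 := Nat.findGreatest (fun d : Nat => pvG (↑(c :: t)) (mn + (d : Int)) ≤ (k : Int)) k with hd0
  have hspec := Nat.findGreatest_spec
    (P := fun d : Nat => pvG (↑(c :: t)) (mn + (d : Int)) ≤ (k : Int)) (Nat.zero_le k) hP0
  refine ⟨mn + (d0 : Int), hspec, ?_⟩
  by_cases hd : d0 = k
  · have hsing := pv_single_le_G (Multiset.mem_coe.mpr hmem) (mn + (d0 : Int) + 1)
    have : max (mn + (d0 : Int) + 1 - mn) 0 = (d0 : Int) + 1 := by omega
    omega
  · have hlt : d0 < k := lt_of_le_of_ne (Nat.findGreatest_le k) hd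
    have hnot := Nat.findGreatest_is_greatest
      (P := fun d : Nat => pvG (↑(c :: t)) (mn + (d : Int)) ≤ (k : Int))
      (Nat.lt_succ_self d0) (by omega)
    push_cast at hnot ⊢
    rw [← add_assoc] at hnot
    omega

theorem pvNle_mono (s : Multiset Int) {L L' : Int} (h : L ≤ L') : pvNle s L ≤ pvNle s L' := by
  apply Multiset.card_le_card
  apply Multiset.monotone_filter_right
  intro x hx
  omega

theorem aLoop_succ (k : Nat) (q : List Int) : aLoop (k + 1) q = aStep (aLoop k q) := by
  induction k generalizing q with
  | zero => rfl
  | succ k ih => rw [show aLoop (k + 2) q = aLoop (k + 1) (aStep q) from rfl, ih, aLoop]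

theorem pv_min_of_canon (l' : List Int) (s : Multiset Int) (L : Int) (r : Nat)
    (h : (↑l' : Multiset Int) = pvCanon s L r) (hr : r < pvNle s L) :
    PySem.List.min? l' (fun x => x) = some L := by
  have hmemL : L ∈ l' := by
    rw [← Multiset.mem_coe, h]
    unfold pvCanon
    refine Multiset.mem_add.mpr (Or.inl (Multiset.mem_add.mpr (Or.inr ?_)))
    rw [Multiset.mem_replicate]
    exact ⟨by omega, rfl⟩
  have hlb : ∀ y ∈ l', L ≤ y := by
    intro y hy
    rw [← Multiset.mem_coe, h] at hy
    unfold pvCanon at hy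
    rcases Multiset.mem_add.mp hy with hy | hy
    · rcases Multiset.mem_add.mp hy with hy | hy
      · exact le_of_lt (Multiset.mem_filter.mp hy).2
      · rw [Multiset.eq_of_mem_replicate hy]
    · have := Multiset.eq_of_mem_replicate hy
      omega
  cases hmin : PySem.List.min? l' (fun x => x) with
  | none =>
    rw [PySem.List.min?_eq_none_iff] at hmin
    subst hmin
    simp at hmemL
  | some m =>
    have h1 := PySem.List.min?_mem hmin
    have h2 := PySem.List.min?_isMin hmin
    have : m = L := le_antisymm (h2 L hmemL) (hlb m h1)
    rw [this]

theorem pvCanon_erase_add (s : Multiset Int) (L : Int) (r : Nat) (hrlt : r < pvNle s L) :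
    (pvCanon s L r).erase L + {L + 1} =
      s.filter (fun x => L < x) + Multiset.replicate (pvNle s L - (r + 1)) L
        + Multiset.replicate (r + 1) (L + 1) := by
  unfold pvCanon
  have h1 : Multiset.replicate (pvNle s L - r) L
      = L ::ₘ Multiset.replicate (pvNle s L - (r + 1)) L := by
    rw [← Multiset.replicate_succ]
    congr 1
    omega
  rw [h1]
  have h2 : s.filter (fun x => L < x) + (L ::ₘ Multiset.replicate (pvNle s L - (r + 1)) L)
        + Multiset.replicate r (L + 1)
      = L ::ₘ (s.filter (fun x => L < x) + Multiset.replicate (pvNle s L - (r + 1)) L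
        + Multiset.replicate r (L + 1)) := by
    rw [Multiset.add_cons, Multiset.cons_add]
  rw [h2, Multiset.erase_cons_head]
  have h3 : Multiset.replicate (r + 1) (L + 1)
      = Multiset.replicate r (L + 1) + {L + 1} := by
    rw [Multiset.replicate_succ, ← Multiset.singleton_add, add_comm]
  rw [h3, ← add_assoc]

theorem pvCanon_levelup (s : Multiset Int) (L : Int) :
    s.filter (fun x => L < x) + Multiset.replicate (pvNle s L) (L + 1)
      = pvCanon s (L + 1) 0 := by
  unfold pvCanon
  rw [Nat.sub_zero, Multiset.replicate_zero, add_zero]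
  have hq : Multiset.filter (fun x => x = L + 1) s
      = Multiset.replicate (s.count (L + 1)) (L + 1) := by
    simpa using Multiset.filter_eq' s (L + 1)
  have hsplitF : s.filter (fun x => L < x)
      = s.filter (fun x => L + 1 < x) + Multiset.replicate (s.count (L + 1)) (L + 1) := by
    have hff := Multiset.filter_add_filter (fun x => L + 1 < x) (fun x => x = L + 1) s
    have hpq : Multiset.filter (fun x => L + 1 < x ∨ x = L + 1) s
        = Multiset.filter (fun x => L < x) s := by
      apply Multiset.filter_congr
      intro x hx
      omega
    have hpand : Multiset.filter (fun x => L + 1 < x ∧ x = L + 1) s = 0 := by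
      rw [Multiset.filter_eq_nil]
      intro a ha
      omega
    rw [hpq, hpand, add_zero, hq] at hff
    exact hff.symm
  have hsplitN : pvNle s (L + 1) = pvNle s L + s.count (L + 1) := by
    unfold pvNle
    have hff := Multiset.filter_add_filter (fun x => x ≤ L) (fun x => x = L + 1) s
    have hpq : Multiset.filter (fun x => x ≤ L ∨ x = L + 1) s
        = Multiset.filter (fun x => x ≤ L + 1) s := by
      apply Multiset.filter_congr
      intro x hx
      omega
    have hpand : Multiset.filter (fun x => x ≤ L ∧ x = L + 1) s = 0 := by
      rw [Multiset.filter_eq_nil]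
      intro a ha
      omega
    rw [hpq, hpand, add_zero, hq] at hff
    rw [← hff, Multiset.card_add, Multiset.card_replicate]
  rw [hsplitF, hsplitN, Multiset.replicate_add]
  abel

theorem pvLoop_canon (k : Nat) (l : List Int) (hl : l ≠ []) (L : Int)
    (h0 : pvG (↑l) L ≤ (k : Int)) (h1 : (k : Int) < pvG (↑l) (L + 1)) :
    (↑(aLoop k l) : Multiset Int) = pvCanon (↑l) L ((k : Int) - pvG (↑l) L).toNat := by
  induction k generalizing L with
  | zero =>
    have hGz : pvG (↑l) L = 0 := le_antisymm (by exact_mod_cast h0) (pvG_nonneg _ _)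
    have hall : ∀ x ∈ (↑l : Multiset Int), L ≤ x := by
      intro x hx
      have h2 := pv_single_le_G hx L
      rw [hGz] at h2
      by_contra hc
      have : max (L - x) 0 = L - x := max_eq_left (by omega)
      omega
    rw [hGz]
    norm_num
    unfold pvCanon
    rw [Multiset.replicate_zero, add_zero, Nat.sub_zero]
    have hrep : Multiset.filter (fun x => ¬ L < x) (↑l : Multiset Int)
        = Multiset.replicate (pvNle (↑l) L) L := by
      rw [Multiset.eq_replicate]
      refine ⟨?_, ?_⟩
      · unfold pvNle
        congr 1
        apply Multiset.filter_congr
        intro x hx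
        omega
      · intro b hb
        have hm := Multiset.mem_filter.mp hb
        have := hall b hm.1
        omega
    rw [← hrep]
    exact (Multiset.filter_add_not (fun x => L < x) (↑l : Multiset Int)).symm
  | succ k ih =>
    obtain ⟨L₀, g0, g1⟩ := pv_exists_lev l hl k
    set r := ((k : Int) - pvG (↑l) L₀).toNat with hr
    have hcanon := ih L₀ g0 g1
    have hGnn := pvG_nonneg (↑l : Multiset Int) L₀
    have hGr : pvG (↑l) L₀ = (k : Int) - (r : Int) := by omega
    have hsucc := pvG_succ (↑l : Multiset Int) L₀
    have hrlt : r < pvNle (↑l) L₀ := by omega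
    have hmin := pv_min_of_canon (aLoop k l) (↑l) L₀ r hcanon hrlt
    have hms : (↑(aLoop (k + 1) l) : Multiset Int)
        = (pvCanon (↑l) L₀ r).erase L₀ + {L₀ + 1} := by
      rw [aLoop_succ]
      unfold aStep
      rw [hmin]
      calc (↑((aLoop k l).erase L₀ ++ [L₀ + 1]) : Multiset Int)
          = (↑((aLoop k l).erase L₀) : Multiset Int) + ↑([L₀ + 1] : List Int) :=
            (Multiset.coe_add _ _).symm
        _ = (↑(aLoop k l) : Multiset Int).erase L₀ + {L₀ + 1} := by
            rw [Multiset.coe_erase]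
            rfl
        _ = (pvCanon (↑l) L₀ r).erase L₀ + {L₀ + 1} := by rw [hcanon]
    rw [hms, pvCanon_erase_add (↑l) L₀ r hrlt]
    rcases Nat.lt_or_ge (r + 1) (pvNle (↑l) L₀) with hc | hc
    · have hLL : L = L₀ := by
        apply pvLev_unique h0 h1 <;> push_cast <;> omega
      subst hLL
      have hrr : (((k : Nat) + 1 : Int) - pvG (↑l) L).toNat = r + 1 := by omega
      unfold pvCanon
      push_cast
      rw [hrr]
    · have hc' : r + 1 = pvNle (↑l) L₀ := by omega
      have hG1 : pvG (↑l) (L₀ + 1) = ((k : Nat) + 1 : Int) := by omega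
      have hnle1 : 1 ≤ pvNle (↑l) (L₀ + 1) := by
        have := pvNle_mono (↑l : Multiset Int) (show L₀ ≤ L₀ + 1 by omega)
        omega
      have hsucc2 := pvG_succ (↑l : Multiset Int) (L₀ + 1)
      have hLL : L = L₀ + 1 := by
        apply pvLev_unique h0 h1 <;> push_cast <;> omega
      subst hLL
      have hrr : ((((k + 1 : Nat)) : Int) - pvG (↑l) (L₀ + 1)).toNat = 0 := by push_cast; omega
      rw [hrr, ← pvCanon_levelup, hc']
      congr 1
      rw [Nat.sub_self, Multiset.replicate_zero, add_zero]

theorem pv_altSearch_aux (counts : List Int) (k : Int) :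
    ∀ (n : Nat) (lo hi : Int), (hi - lo).toNat ≤ n → lo < hi →
      altExcess counts hi ≤ k → ¬ altExcess counts lo ≤ k →
      altExcess counts (altSearch counts k lo hi) ≤ k ∧
      ¬ altExcess counts (altSearch counts k lo hi - 1) ≤ k := by
  intro n
  induction n with
  | zero =>
    intro lo hi hb hlt _ _
    omega
  | succ n ih =>
    intro lo hi hb hlt hhi hlo
    by_cases hcond : lo + 1 < hi
    · have hz : altSearch counts k lo hi =
          if altExcess counts (PySem.Int.floordiv (lo + hi) 2) ≤ k then
            altSearch counts k lo (PySem.Int.floordiv (lo + hi) 2)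
          else altSearch counts k (PySem.Int.floordiv (lo + hi) 2) hi := by
        rw [altSearch, dif_pos hcond]
      rw [hz]
      have hmb := pvMidBounds lo hi hcond
      by_cases hmid : altExcess counts (PySem.Int.floordiv (lo + hi) 2) ≤ k
      · rw [if_pos hmid]
        exact ih lo _ (by omega) hmb.1 hmid hlo
      · rw [if_neg hmid]
        exact ih _ hi (by omega) hmb.2 hhi hmid
    · have hz : altSearch counts k lo hi = hi := by rw [altSearch, dif_neg hcond]
      rw [hz]
      refine ⟨hhi, ?_⟩
      rw [show hi - 1 = lo from by omega]
      exact hlo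

theorem pv_altSearch_spec (counts : List Int) (k : Int) :
    ∀ lo hi : Int, lo < hi → altExcess counts hi ≤ k → ¬ altExcess counts lo ≤ k →
      altExcess counts (altSearch counts k lo hi) ≤ k ∧
      ¬ altExcess counts (altSearch counts k lo hi - 1) ≤ k := by
  intro lo hi
  exact pv_altSearch_aux counts k (hi - lo).toNat lo hi le_rfl

theorem aStep_nil : aStep [] = [] := rfl

theorem aLoop_nil (n : Nat) : aLoop n [] = [] := by
  induction n with
  | zero => rfl
  | succ n ih => rw [aLoop, aStep_nil, ih]

theorem altExcess_eq (p : List Int) (M : Int) :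
    altExcess p M = (p.map (fun c => max (c - M) 0)).sum := by
  unfold altExcess
  induction p with
  | nil => simp
  | cons a t ih =>
    rcases le_or_gt a M with h | h
    · rw [List.filter_cons_of_neg (by simp; omega), List.map_cons, List.sum_cons, ih]
      omega
    · rw [List.filter_cons_of_pos (by simp; omega), List.map_cons, List.map_cons,
        List.sum_cons, List.sum_cons, ih]
      omega

theorem pvG_neg_map (p : List Int) (M : Int) :
    pvG (↑(p.map (fun value => -value))) M = altExcess p (-M) := by
  rw [altExcess_eq]
  unfold pvG
  rw [Multiset.map_coe, Multiset.sum_coe, List.map_map]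
  congr 1
  apply List.map_congr_left
  intro x _
  simp only [Function.comp_apply]
  omega

theorem pv_core (p : List Int) (hp : p ≠ []) (level : Int) (k : Nat)
    (hsle : altExcess p level ≤ (k : Int))
    (hsgt : ¬ altExcess p (level - 1) ≤ (k : Int)) :
    ((aLoop k (p.map (fun value => -value))).map (fun value => value ^ 2)).sum
      = ((p.filter (fun x => decide (x < level))).map (fun x => x * x)).sum
        + (((p.filter (fun x => decide (level ≤ x))).length : Int)
            - ((k : Int) - altExcess p level)) * level * level
        + ((k : Int) - altExcess p level) * (level - 1) * (level - 1) := by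
  have hmapne : p.map (fun value => -value) ≠ [] := by
    simpa using hp
  have hAE : altExcess p level = pvG (↑(p.map (fun value => -value))) (-level) := by
    rw [pvG_neg_map, neg_neg]
  have h0 : pvG (↑(p.map (fun value => -value))) (-level) ≤ (k : Int) := by
    rw [← hAE]; exact hsle
  have h1 : (k : Int) < pvG (↑(p.map (fun value => -value))) (-level + 1) := by
    rw [pvG_neg_map, show -(-level + 1) = level - 1 from by ring]
    omega
  have hmain := pvLoop_canon k (p.map (fun value => -value)) hmapne (-level) h0 h1
  have hA : ((aLoop k (p.map (fun value => -value))).map (fun value => value ^ 2)).sum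
      = (Multiset.map (fun value => value ^ 2)
          (↑(aLoop k (p.map (fun value => -value))) : Multiset Int)).sum := by
    rw [Multiset.map_coe, Multiset.sum_coe]
  have hGnn := pvG_nonneg (↑(p.map (fun value => -value)) : Multiset Int) (-level)
  have hsucc := pvG_succ (↑(p.map (fun value => -value)) : Multiset Int) (-level)
  have hrle : ((k : Int) - pvG (↑(p.map (fun value => -value))) (-level)).toNat
      ≤ pvNle (↑(p.map (fun value => -value))) (-level) := by
    omega
  have hfil : (Multiset.map (fun value => value ^ 2)
        (Multiset.filter (fun x => -level < x) (↑(p.map (fun value => -value)) : Multiset Int))).sum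
      = ((p.filter (fun x => decide (x < level))).map (fun x => x * x)).sum := by
    rw [Multiset.filter_coe, Multiset.map_coe, Multiset.sum_coe, List.filter_map, List.map_map]
    have hfc : p.filter ((fun x => decide (-level < x)) ∘ (fun value => -value))
        = p.filter (fun x => decide (x < level)) := by
      apply List.filter_congr
      intro x _
      simp only [Function.comp_apply, decide_eq_decide]
      omega
    rw [hfc]
    congr 1
    apply List.map_congr_left
    intro x _
    simp only [Function.comp_apply]
    ring
  have hnle : pvNle (↑(p.map (fun value => -value))) (-level)
      = (p.filter (fun x => decide (level ≤ x))).length := by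
    unfold pvNle
    rw [Multiset.filter_coe, Multiset.coe_card, List.filter_map, List.length_map]
    congr 1
    apply List.filter_congr
    intro x _
    simp only [Function.comp_apply, decide_eq_decide]
    omega
  rw [hA, hmain]
  unfold pvCanon
  rw [Multiset.map_add, Multiset.map_add, Multiset.sum_add, Multiset.sum_add,
    Multiset.map_replicate, Multiset.map_replicate, Multiset.sum_replicate,
    Multiset.sum_replicate, nsmul_eq_mul, nsmul_eq_mul, hfil, hAE]
  rw [Nat.cast_sub hrle, hnle]
  rw [Int.toNat_of_nonneg (by omega)]
  ring

-- ===== VERDICT (by name: the statement is the Claim_ definition above) =====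
theorem minimumValue_spec : Claim_equal_minimumValue := by
  intro s ra _ _
  unfold Spec_minimumValue
  cases hcv : (PySem.Dict.counter s.toList).values with
  | nil =>
    simp [minimumValue, minimumValue_alt, hcv, aLoop_nil]
  | cons c rest =>
    simp only [minimumValue, minimumValue_alt, hcv]
    rw [← Int.ofNat_toNat ra]
    have hk0 : (0 : Int) ≤ (ra.toNat : Int) := by positivity
    have hminle := PySem.List.foldl_min_le rest c
    have hmaxle := PySem.List.le_foldl_max rest c
    have hmnmem : rest.foldl min c ∈ (c :: rest) := by
      rcases PySem.List.foldl_min_mem rest c with h | h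
      · rw [h]; exact List.mem_cons_self
      · exact List.mem_cons_of_mem _ h
    have hhi : altExcess (c :: rest) (rest.foldl max c) ≤ (ra.toNat : Int) := by
      have hz : altExcess (c :: rest) (rest.foldl max c) = 0 := by
        unfold altExcess
        rw [List.filter_eq_nil_iff.mpr ?_]
        · rfl
        · intro x hx
          rcases List.mem_cons.mp hx with rfl | hx
          · simp; omega
          · have := hmaxle.2 x hx
            simp; omega
      omega
    have hlo : ¬ altExcess (c :: rest) (rest.foldl min c - (ra.toNat : Int) - 1)
        ≤ (ra.toNat : Int) := by
      rw [altExcess_eq]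
      have hmem2 : max (rest.foldl min c - (rest.foldl min c - (ra.toNat : Int) - 1)) 0
          ∈ (c :: rest).map (fun x => max (x - (rest.foldl min c - (ra.toNat : Int) - 1)) 0) :=
        List.mem_map_of_mem hmnmem
      have hle := List.single_le_sum (l := (c :: rest).map
          (fun x => max (x - (rest.foldl min c - (ra.toNat : Int) - 1)) 0))
        (by intro x hx
            obtain ⟨y, _, rfl⟩ := List.mem_map.mp hx
            exact le_max_right _ _) _ hmem2
      omega
    have hlt : rest.foldl min c - (ra.toNat : Int) - 1 < rest.foldl max c := by
      have h1 := hminle.1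
      have h2 := hmaxle.1
      omega
    obtain ⟨hsle, hsgt⟩ := pv_altSearch_spec (c :: rest) (ra.toNat : Int)
      (rest.foldl min c - (ra.toNat : Int) - 1) (rest.foldl max c) hlt hhi hlo
    exact pv_core (c :: rest) (by simp) _ ra.toNat hsle hsgt
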